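-- pv_equiv track=rewrite | github.com/tutoo99/strategy-material-engine | scripts/audit_case_resources.py | summarize_case_status
-- ===== SOURCE A (Python) =====
-- def summarize_case_status(link_rows: list[dict]) -> str:
--     statuses = {str(row.get("status", "")).strip() for row in link_rows}
--     if not link_rows:
--         return "no_resources"
--     if statuses <= {"healthy"}:
--         return "healthy"
--     if "missing" in statuses or "broken" in statuses:
--         return "degraded"
--     if statuses <= {"pending_remote_check"}:
--         return "unchecked"
--     return "mixed"
-- ===== SOURCE B (Python) =====
-- def summarize_case_status(link_rows: list[dict]) -> str:
--     # Map each row to its own verdict, then reduce with an associative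
--     # lattice join: "degraded" is absorbing, equal verdicts keep, and two
--     # distinct non-degraded verdicts merge to "mixed".
--     def verdict(row):
--         s = str(row.get("status", "")).strip()
--         if s == "healthy":
--             return "healthy"
--         if s == "missing" or s == "broken":
--             return "degraded"
--         if s == "pending_remote_check":
--             return "unchecked"
--         return "mixed"
--
--     def join(x, y):
--         if x == "degraded" or y == "degraded":
--             return "degraded"
--         return x if x == y else "mixed"
--
--     if not link_rows:
--         return "no_resources"
--     verdicts = [verdict(row) for row in link_rows]
--     acc = verdicts[0]
--     for v in verdicts[1:]:
--         acc = join(acc, v)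
--     return acc
-- ===== Notes on version B (the rewrite author's own statement) =====
-- stated objective: alternative
-- what changed: Replaces A's global set construction and subset/membership tests by a map-reduce: each row is classified to a local verdict (healthy/degraded/unchecked/mixed) and the verdicts are folded with an associative lattice join (degraded absorbing, equal keeps, distinct gives mixed).
import Mathlib
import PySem

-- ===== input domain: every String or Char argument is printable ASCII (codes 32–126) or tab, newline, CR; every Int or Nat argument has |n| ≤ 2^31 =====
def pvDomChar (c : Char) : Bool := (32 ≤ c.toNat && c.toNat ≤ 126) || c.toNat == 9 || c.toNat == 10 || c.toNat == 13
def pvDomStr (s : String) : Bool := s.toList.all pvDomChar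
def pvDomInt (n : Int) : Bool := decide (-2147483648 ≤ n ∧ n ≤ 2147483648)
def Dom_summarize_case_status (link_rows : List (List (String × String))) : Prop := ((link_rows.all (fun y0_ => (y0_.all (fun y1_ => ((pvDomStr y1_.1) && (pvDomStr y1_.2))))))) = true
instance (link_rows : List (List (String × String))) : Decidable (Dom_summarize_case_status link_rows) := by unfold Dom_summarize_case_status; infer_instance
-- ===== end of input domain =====

-- B replaces A's set of statuses and subset/membership tests by a map-reduce:
-- each row gets a local verdict, and verdicts are folded with an associative
-- lattice join (objective: alternative; same result, no speed claim).

-- ===== PORT A =====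
-- str(row.get("status", "")).strip(): the value is already a str, so str() is the identity.
def pvRowStatus (row : List (String × String)) : String :=
  PySem.Str.strip (PySem.Dict.getD (PySem.Dict.mk row) "status" "")

def summarize_case_status (link_rows : List (List (String × String))) : String :=
  let statuses : PySem.Set String := PySem.Set.ofList (link_rows.map pvRowStatus)
  if link_rows = [] then "no_resources"
  else if PySem.Set.issubset statuses (PySem.Set.ofList ["healthy"]) then "healthy"
  else if PySem.Set.contains statuses "missing" || PySem.Set.contains statuses "broken" then "degraded"
  else if PySem.Set.issubset statuses (PySem.Set.ofList ["pending_remote_check"]) then "unchecked"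
  else "mixed"

-- ===== PORT B =====
-- verdict(row): the per-row classification of Source B
def pvVerdictOf (s : String) : String :=
  if s = "healthy" then "healthy"
  else if s = "missing" ∨ s = "broken" then "degraded"
  else if s = "pending_remote_check" then "unchecked"
  else "mixed"

def pvVerdict (row : List (String × String)) : String := pvVerdictOf (pvRowStatus row)

-- join(x, y): the associative merge of Source B
def pvJoin (x y : String) : String :=
  if x = "degraded" ∨ y = "degraded" then "degraded"
  else if x = y then x
  else "mixed"

def summarize_case_status_alt (link_rows : List (List (String × String))) : String :=
  match link_rows with
  | [] => "no_resources"
  | r :: rs => (rs.map pvVerdict).foldl pvJoin (pvVerdict r)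

-- ===== PRECONDITION & SPEC =====
def Spec_summarize_case_status (link_rows : List (List (String × String))) (out : String) : Prop := out = summarize_case_status_alt link_rows
instance (link_rows : List (List (String × String))) (out : String) : Decidable (Spec_summarize_case_status link_rows out) := by unfold Spec_summarize_case_status; infer_instance

-- ===== CLAIM (what is proved, stated in full; the proofs are below) =====
def Claim_equal_summarize_case_status : Prop := ∀ (link_rows : List (List (String × String))), Dom_summarize_case_status link_rows → Spec_summarize_case_status link_rows (summarize_case_status link_rows)

-- ===== LEMMAS AND PROOFS =====

theorem verdict_eq_healthy (r : List (String × String)) :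
    (pvVerdict r = "healthy") ↔ pvRowStatus r = "healthy" := by
  unfold pvVerdict pvVerdictOf
  split_ifs with h1 h2 h3
  · exact iff_of_true rfl h1
  · exact iff_of_false (by decide) h1
  · exact iff_of_false (by decide) h1
  · exact iff_of_false (by decide) h1

theorem verdict_eq_degraded (r : List (String × String)) :
    (pvVerdict r = "degraded") ↔ (pvRowStatus r = "missing" ∨ pvRowStatus r = "broken") := by
  unfold pvVerdict pvVerdictOf
  split_ifs with h1 h2 h3
  · exact iff_of_false (by decide) (by rw [h1]; decide)
  · exact iff_of_true rfl h2
  · exact iff_of_false (by decide) h2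
  · exact iff_of_false (by decide) h2

theorem verdict_eq_unchecked (r : List (String × String)) :
    (pvVerdict r = "unchecked") ↔ pvRowStatus r = "pending_remote_check" := by
  unfold pvVerdict pvVerdictOf
  split_ifs with h1 h2 h3
  · exact iff_of_false (by decide) (by rw [h1]; decide)
  · refine iff_of_false (by decide) (fun hp => ?_)
    rw [hp] at h2
    rcases h2 with h | h <;> exact absurd h (by decide)
  · exact iff_of_true rfl h3
  · exact iff_of_false (by decide) h3

theorem verdict_eq_degraded' (x : List (String × String)) :
    pvVerdict x = "degraded" ↔ (pvRowStatus x == "missing" || pvRowStatus x == "broken") = true := by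
  rw [verdict_eq_degraded, Bool.or_eq_true, beq_iff_eq, beq_iff_eq]

theorem verdict_beq_degraded (x : List (String × String)) :
    (pvVerdict x == "degraded") = (pvRowStatus x == "missing" || pvRowStatus x == "broken") := by
  by_cases h : pvRowStatus x = "missing" ∨ pvRowStatus x = "broken"
  · rw [(verdict_eq_degraded x).mpr h]
    rcases h with h | h <;> rw [h] <;> decide
  · have he : pvVerdict x ≠ "degraded" := fun hh => h ((verdict_eq_degraded x).mp hh)
    have h1 : pvRowStatus x ≠ "missing" := fun hh => h (Or.inl hh)
    have h2 : pvRowStatus x ≠ "broken" := fun hh => h (Or.inr hh)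
    rw [show (pvVerdict x == "degraded") = false from beq_eq_false_iff_ne.mpr he,
      show (pvRowStatus x == "missing") = false from beq_eq_false_iff_ne.mpr h1,
      show (pvRowStatus x == "broken") = false from beq_eq_false_iff_ne.mpr h2,
      Bool.false_or]

theorem verdict_beq_healthy (x : List (String × String)) :
    (pvVerdict x == "healthy") = (pvRowStatus x == "healthy") := by
  by_cases h : pvRowStatus x = "healthy"
  · rw [(verdict_eq_healthy x).mpr h, h]
  · have he : pvVerdict x ≠ "healthy" := fun hh => h ((verdict_eq_healthy x).mp hh)
    simp [he, h]

theorem verdict_beq_unchecked (x : List (String × String)) :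
    (pvVerdict x == "unchecked") = (pvRowStatus x == "pending_remote_check") := by
  by_cases h : pvRowStatus x = "pending_remote_check"
  · rw [(verdict_eq_unchecked x).mpr h, h]; decide
  · have he : pvVerdict x ≠ "unchecked" := fun hh => h ((verdict_eq_unchecked x).mp hh)
    simp [he, h]

theorem anyD_eq (rs : List (List (String × String))) :
    ((rs.map pvVerdict).any (· == "degraded")) =
      rs.any (fun x => pvRowStatus x == "missing" || pvRowStatus x == "broken") := by
  induction rs with
  | nil => rfl
  | cons y ys ih => simp only [List.map_cons, List.any_cons, ih, verdict_beq_degraded]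

theorem allH_eq (rs : List (List (String × String))) :
    ((rs.map pvVerdict).all (· == "healthy")) =
      rs.all (fun x => pvRowStatus x == "healthy") := by
  induction rs with
  | nil => rfl
  | cons y ys ih => simp only [List.map_cons, List.all_cons, ih, verdict_beq_healthy]

theorem allP_eq (rs : List (List (String × String))) :
    ((rs.map pvVerdict).all (· == "unchecked")) =
      rs.all (fun x => pvRowStatus x == "pending_remote_check") := by
  induction rs with
  | nil => rfl
  | cons y ys ih => simp only [List.map_cons, List.all_cons, ih, verdict_beq_unchecked]

-- evaluation lemmas for pvJoin (used by the fold characterisation)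
theorem pvJoin_dd (y : String) : pvJoin "degraded" y = "degraded" := by
  unfold pvJoin; rw [if_pos (Or.inl rfl)]

theorem pvJoin_xd (x : String) : pvJoin x "degraded" = "degraded" := by
  unfold pvJoin; rw [if_pos (Or.inr rfl)]

theorem pvJoin_self (x : String) : pvJoin x x = x := by
  unfold pvJoin
  split_ifs with h h2
  · rcases h with h | h <;> exact h.symm
  · rfl
  · exact absurd rfl h2

theorem pvJoin_mixed (x y : String) (hx : x ≠ "degraded") (hy : y ≠ "degraded")
    (hxy : x ≠ y) : pvJoin x y = "mixed" := by
  unfold pvJoin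
  rw [if_neg (by rintro (h | h); exacts [hx h, hy h]), if_neg hxy]

/-- Characterisation of B's fold: degraded is absorbing, otherwise the fold keeps
its accumulator iff every remaining verdict equals it, and gives "mixed" otherwise. -/
theorem foldl_pvJoin (l : List String) (a : String) :
    l.foldl pvJoin a =
      if a = "degraded" ∨ l.any (· == "degraded") then "degraded"
      else if l.all (· == a) then a else "mixed" := by
  induction l generalizing a with
  | nil =>
      by_cases ha : a = "degraded"
      · subst ha; simp
      · simp [ha]
  | cons x xs ih =>
      rw [List.foldl_cons, ih, List.any_cons, List.all_cons]
      by_cases ha : a = "degraded"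
      · subst ha
        rw [pvJoin_dd, if_pos (Or.inl rfl), if_pos (Or.inl rfl)]
      · by_cases hx : x = "degraded"
        · subst hx
          rw [pvJoin_xd, if_pos (Or.inl rfl), if_pos (Or.inr (by simp))]
        · by_cases hax : a = x
          · subst hax
            rw [pvJoin_self,
              show ((a == "degraded") || xs.any (· == "degraded")) = xs.any (· == "degraded") from by simp [ha],
              show ((a == a) && xs.all (· == a)) = xs.all (· == a) from by simp]
          · have hxa : (x == a) = false := by
              simp only [beq_eq_false_iff_ne, ne_eq]
              exact fun h => hax h.symm
            rw [pvJoin_mixed a x ha hx hax,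
              show ((x == "degraded") || xs.any (· == "degraded")) = xs.any (· == "degraded") from by simp [hx],
              hxa, Bool.false_and]
            by_cases hd : xs.any (· == "degraded") = true
            · rw [if_pos (Or.inr hd), if_pos (Or.inr hd)]
            · have h1 : ¬(("mixed" : String) = "degraded" ∨ (xs.any (· == "degraded")) = true) :=
                fun hc => hc.elim (fun h => absurd h (by decide)) hd
              have h2 : ¬(a = "degraded" ∨ (xs.any (· == "degraded")) = true) :=
                fun hc => hc.elim ha hd
              rw [if_neg h1, if_neg h2, if_neg Bool.false_ne_true, ite_self]

/-- B's fold condition for "degraded" matches A's membership test over all rows. -/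
theorem key_anyD (r : List (String × String)) (rs : List (List (String × String))) :
    (pvVerdict r = "degraded" ∨ ((rs.map pvVerdict).any (· == "degraded")) = true) ↔
      ((r :: rs).any (fun x => pvRowStatus x == "missing" || pvRowStatus x == "broken") = true) := by
  rw [anyD_eq, List.any_cons, Bool.or_eq_true, verdict_eq_degraded']

/-- B on a nonempty list equals the four-branch classification over statuses. -/
theorem alt_characterisation (r : List (String × String)) (rs : List (List (String × String))) :
    summarize_case_status_alt (r :: rs) =
      if (r :: rs).all (fun x => pvRowStatus x == "healthy") then "healthy"
      else if (r :: rs).any (fun x => pvRowStatus x == "missing" || pvRowStatus x == "broken") then "degraded"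
      else if (r :: rs).all (fun x => pvRowStatus x == "pending_remote_check") then "unchecked"
      else "mixed" := by
  show (rs.map pvVerdict).foldl pvJoin (pvVerdict r) = _
  rw [foldl_pvJoin]
  by_cases hD : (r :: rs).any (fun x => pvRowStatus x == "missing" || pvRowStatus x == "broken") = true
  · have hAH : ¬ ((r :: rs).all (fun x => pvRowStatus x == "healthy") = true) := by
      intro hall
      rw [List.all_eq_true] at hall
      rw [List.any_eq_true] at hD
      obtain ⟨x, hx, hxd⟩ := hD
      have h1 := hall x hx
      simp only [beq_iff_eq] at h1
      revert hxd
      rw [h1]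
      decide
    rw [if_pos ((key_anyD r rs).mpr hD), if_neg hAH, if_pos hD]
  · rw [if_neg (fun h => hD ((key_anyD r rs).mp h))]
    by_cases hH : (r :: rs).all (fun x => pvRowStatus x == "healthy") = true
    · have hH' := hH
      rw [List.all_cons, Bool.and_eq_true] at hH'
      obtain ⟨hr, hrs⟩ := hH'
      simp only [beq_iff_eq] at hr
      have hv : pvVerdict r = "healthy" := (verdict_eq_healthy r).mpr hr
      have hall : ((rs.map pvVerdict).all (· == pvVerdict r)) = true := by
        rw [hv, allH_eq]; exact hrs
      rw [if_pos hall, hv, if_pos hH]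
    · by_cases hP : (r :: rs).all (fun x => pvRowStatus x == "pending_remote_check") = true
      · have hP' := hP
        rw [List.all_cons, Bool.and_eq_true] at hP'
        obtain ⟨hr, hrs⟩ := hP'
        simp only [beq_iff_eq] at hr
        have hv : pvVerdict r = "unchecked" := (verdict_eq_unchecked r).mpr hr
        have hall : ((rs.map pvVerdict).all (· == pvVerdict r)) = true := by
          rw [hv, allP_eq]; exact hrs
        rw [if_pos hall, hv, if_neg hH, if_neg hD, if_pos hP]
      · rw [if_neg hH, if_neg hD, if_neg hP]
        by_cases hall : ((rs.map pvVerdict).all (· == pvVerdict r)) = true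
        · have hrD : pvVerdict r ≠ "degraded" :=
            fun h => hD ((key_anyD r rs).mp (Or.inl h))
          have hrH : pvVerdict r ≠ "healthy" := by
            intro h
            apply hH
            rw [List.all_cons, Bool.and_eq_true]
            constructor
            · simp [(verdict_eq_healthy r).mp h]
            · rw [h] at hall
              rw [← allH_eq]; exact hall
          have hrP : pvVerdict r ≠ "unchecked" := by
            intro h
            apply hP
            rw [List.all_cons, Bool.and_eq_true]
            constructor
            · simp [(verdict_eq_unchecked r).mp h]
            · rw [h] at hall
              rw [← allP_eq]; exact hall
          have hm : pvVerdict r = "mixed" := by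
            revert hrD hrH hrP
            unfold pvVerdict pvVerdictOf
            split_ifs <;> simp
          rw [if_pos hall, hm]
        · rw [if_neg hall]

theorem issubset_singleton (xs : List String) (v : String) :
    PySem.Set.issubset (PySem.Set.ofList xs) (PySem.Set.ofList [v]) =
      xs.all (fun x => x == v) := by
  apply Bool.eq_iff_iff.mpr
  rw [PySem.Set.issubset_iff, List.all_eq_true]
  constructor
  · intro h x hx
    have := h x ((PySem.Set.mem_ofList xs x).mpr hx)
    rw [PySem.Set.mem_ofList] at this
    simpa using this
  · intro h x hx
    rw [PySem.Set.mem_ofList] at hx ⊢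
    simpa using h x hx

theorem contains_ofList_any (rows : List (List (String × String))) (v : String) :
    PySem.Set.contains (PySem.Set.ofList (rows.map pvRowStatus)) v =
      rows.any (fun r => pvRowStatus r == v) := by
  apply Bool.eq_iff_iff.mpr
  rw [PySem.Set.contains_iff, PySem.Set.mem_ofList, List.any_eq_true]
  constructor
  · intro h
    rcases List.mem_map.mp h with ⟨r, hr, rfl⟩
    exact ⟨r, hr, by simp⟩
  · rintro ⟨r, hr, h⟩
    exact List.mem_map.mpr ⟨r, hr, eq_of_beq h⟩

theorem all_map_status (rows : List (List (String × String))) (v : String) :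
    (rows.map pvRowStatus).all (fun x => x == v) =
      rows.all (fun r => pvRowStatus r == v) := by
  simp [List.all_map, Function.comp_def]

/-- any over a disjunction splits into two anys. -/
theorem any_or_status (rows : List (List (String × String))) :
    rows.any (fun r => pvRowStatus r == "missing" || pvRowStatus r == "broken") =
      (rows.any (fun r => pvRowStatus r == "missing") ||
       rows.any (fun r => pvRowStatus r == "broken")) := by
  induction rows with
  | nil => simp
  | cons r rs ih =>
      simp only [List.any_cons, ih]
      cases pvRowStatus r == "missing" <;> cases pvRowStatus r == "broken" <;> simp

-- ===== VERDICT (by name: the statement is the Claim_ definition above) =====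
theorem summarize_case_status_spec : Claim_equal_summarize_case_status := by
  intro rows _
  unfold Spec_summarize_case_status
  cases rows with
  | nil => rfl
  | cons r rs =>
      rw [alt_characterisation]
      unfold summarize_case_status
      have hrows : (r :: rs : List (List (String × String))) ≠ [] := List.cons_ne_nil r rs
      simp only [if_neg hrows]
      simp only [issubset_singleton, contains_ofList_any, all_map_status]
      rw [any_or_status]
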